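-- pv_equiv track=rewrite | github.com/akimgnts/elevia | apps/api/src/context/extractors.py | _extract_tools_from_skills_list
-- ===== SOURCE A (Python) =====
-- import unicodedata
-- from typing import Dict, Iterable, List, Optional, Tuple
--
-- def _strip_accents(text: str) -> str:
--     nfkd = unicodedata.normalize("NFKD", text or "")
--     return "".join(ch for ch in nfkd if not unicodedata.combining(ch))
--
-- def _fold(text: str) -> str:
--     return _strip_accents(text).lower()
--
-- TOOLS_KEYWORDS: Dict[str, List[str]] = {
--     "SQL": ["sql"],
--     "Excel": ["excel", "xls", "vba"],
--     "Power BI": ["power bi", "powerbi"],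
--     "Tableau": ["tableau"],
--     "Looker": ["looker"],
--     "Python": ["python"],
--     "R": [" langage r ", " r studio", " r "],
--     "SAS": ["sas"],
--     "Spark": ["spark"],
--     "dbt": ["dbt"],
--     "Airflow": ["airflow"],
--     "BigQuery": ["bigquery"],
--     "Snowflake": ["snowflake"],
--     "Redshift": ["redshift"],
--     "AWS": ["aws", "amazon web services"],
--     "Azure": ["azure"],
--     "GCP": ["gcp", "google cloud"],
--     "Git": ["git"],
--     "Jira": ["jira"],
--     "API": [" api ", " apis", " api/", " api.", " api,", " rest "],
-- }
--
-- def _extract_tools_from_skills_list(skills: List[str]) -> List[str]: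
--     """Map a list of skill label strings to canonical TOOLS_KEYWORDS names.
--
--     Used as fallback when cv_text_cleaned is absent but profile.skills is available.
--     Short variants (≤2 chars after fold+strip, e.g. "r" for the R language) require
--     exact match to avoid false positives like "r" ∈ "tableur".
--     """
--     found: List[str] = []
--     for tool_name, variants in TOOLS_KEYWORDS.items():
--         matched = False
--         for skill in skills:
--             skill_folded = _fold(skill.strip())
--             for v in variants:
--                 v_clean = _fold(v.strip())
--                 if len(v_clean) <= 2:
--                     # Exact match required for very short tokens (avoids "r" ⊆ "tableur")
--                     if skill_folded == v_clean:
--                         matched = True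
--                 else:
--                     if v_clean in skill_folded or skill_folded in v_clean:
--                         matched = True
--                 if matched:
--                     break
--             if matched:
--                 break
--         if matched:
--             found.append(tool_name)
--     return found
-- ===== SOURCE B (Python) =====
-- import unicodedata
-- from typing import Dict, List
--
--
-- def _strip_accents(text: str) -> str:
--     nfkd = unicodedata.normalize("NFKD", text or "")
--     return "".join(ch for ch in nfkd if not unicodedata.combining(ch))
--
--
-- def _fold(text: str) -> str:
--     return _strip_accents(text).lower()
--
--
-- TOOLS_KEYWORDS: Dict[str, List[str]] = {
--     "SQL": ["sql"],
--     "Excel": ["excel", "xls", "vba"],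
--     "Power BI": ["power bi", "powerbi"],
--     "Tableau": ["tableau"],
--     "Looker": ["looker"],
--     "Python": ["python"],
--     "R": [" langage r ", " r studio", " r "],
--     "SAS": ["sas"],
--     "Spark": ["spark"],
--     "dbt": ["dbt"],
--     "Airflow": ["airflow"],
--     "BigQuery": ["bigquery"],
--     "Snowflake": ["snowflake"],
--     "Redshift": ["redshift"],
--     "AWS": ["aws", "amazon web services"],
--     "Azure": ["azure"],
--     "GCP": ["gcp", "google cloud"],
--     "Git": ["git"],
--     "Jira": ["jira"],
--     "API": [" api ", " apis", " api/", " api.", " api,", " rest "],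
-- }
--
-- # Flat keyword index built once at module load: (tool name, folded variant) pairs.
-- _VARIANT_INDEX: List = [
--     (tool, _fold(v.strip()))
--     for tool, variants in TOOLS_KEYWORDS.items()
--     for v in variants
-- ]
--
--
-- def _extract_tools_from_skills_list(skills: List[str]) -> List[str]:
--     # Skill-major pass: each skill is folded once and scanned against the flat
--     # variant index, accumulating matched tool names in a set; the result is the
--     # canonical TOOLS_KEYWORDS order filtered by that set.
--     matched = set()
--     for s in skills:
--         sk = _fold(s.strip())
--         for tool, v in _VARIANT_INDEX:
--             if tool in matched:
--                 continue
--             if (sk == v) if len(v) <= 2 else (v in sk or sk in v):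
--                 matched.add(tool)
--     return [t for t in TOOLS_KEYWORDS if t in matched]
-- ===== Notes on version B (the rewrite author's own statement) =====
-- stated objective: faster
-- what changed: B inverts the whole loop structure: it builds a flat (tool, folded-variant) keyword index once at module load, then makes a single skill-major pass that folds each skill once and scans the index (skipping tools already matched) accumulating matched tool names into a set, and finally reconstructs the output by filtering the canonical TOOLS_KEYWORDS order through that set - instead of A's tool-major nested scans with matched/break that re-fold every skill and every variant for every tool.
import Mathlib
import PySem

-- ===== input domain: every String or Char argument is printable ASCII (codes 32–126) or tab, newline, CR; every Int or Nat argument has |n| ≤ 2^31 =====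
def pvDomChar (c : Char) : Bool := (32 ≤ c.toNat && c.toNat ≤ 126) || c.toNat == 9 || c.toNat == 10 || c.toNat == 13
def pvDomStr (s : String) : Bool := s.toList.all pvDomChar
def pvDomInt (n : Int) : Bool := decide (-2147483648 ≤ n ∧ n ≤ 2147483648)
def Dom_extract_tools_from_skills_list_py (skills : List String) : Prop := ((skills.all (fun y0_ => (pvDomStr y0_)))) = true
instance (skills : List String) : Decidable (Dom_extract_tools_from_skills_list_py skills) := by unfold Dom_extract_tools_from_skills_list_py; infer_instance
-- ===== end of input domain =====

-- B inverts the loop structure: one skill-major pass over a prebuilt flat keyword index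
-- accumulates matched tool names in a set, then the output is the canonical tool order
-- filtered by that set, instead of A's tool-major nested scans with matched/break.

-- shared module-level helper: _fold = strip accents + lower; on the printable-ASCII
-- domain NFKD accent-stripping is the identity, so _fold is exactly .lower() (exact on Dom)
def pyFold (s : String) : String := PySem.Str.lower s

def TOOLS_KEYWORDS : List (String × List String) := [
  ("SQL", ["sql"]),
  ("Excel", ["excel", "xls", "vba"]),
  ("Power BI", ["power bi", "powerbi"]),
  ("Tableau", ["tableau"]),
  ("Looker", ["looker"]),
  ("Python", ["python"]),
  ("R", [" langage r ", " r studio", " r "]),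
  ("SAS", ["sas"]),
  ("Spark", ["spark"]),
  ("dbt", ["dbt"]),
  ("Airflow", ["airflow"]),
  ("BigQuery", ["bigquery"]),
  ("Snowflake", ["snowflake"]),
  ("Redshift", ["redshift"]),
  ("AWS", ["aws", "amazon web services"]),
  ("Azure", ["azure"]),
  ("GCP", ["gcp", "google cloud"]),
  ("Git", ["git"]),
  ("Jira", ["jira"]),
  ("API", [" api ", " apis", " api/", " api.", " api,", " rest "])]

-- ===== PORT A =====
-- inner 'for v in variants' loop with its matched/break logic
def aVarLoop (skill_folded : String) : List String → Bool
  | [] => false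
  | v :: rest =>
      let v_clean := pyFold (PySem.Str.strip v)
      let matched :=
        if PySem.Str.len v_clean ≤ 2 then skill_folded == v_clean
        else PySem.Str.isIn v_clean skill_folded || PySem.Str.isIn skill_folded v_clean
      if matched then true else aVarLoop skill_folded rest

-- middle 'for skill in skills' loop with its break
def aSkillLoop (skills : List String) (variants : List String) : Bool :=
  match skills with
  | [] => false
  | skill :: rest =>
      let skill_folded := pyFold (PySem.Str.strip skill)
      if aVarLoop skill_folded variants then true else aSkillLoop rest variants

def extract_tools_from_skills_list_py (skills : List String) : List String :=
  TOOLS_KEYWORDS.foldl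
    (fun found p => if aSkillLoop skills p.2 then found ++ [p.1] else found) []

-- ===== PORT B =====
-- flat keyword index built once at module load: (tool name, folded variant) pairs
def VARIANT_INDEX : List (String × String) :=
  TOOLS_KEYWORDS.flatMap (fun p => p.2.map (fun v => (p.1, pyFold (PySem.Str.strip v))))

-- the match rule: exact equality for ≤2-char variants, bidirectional substring otherwise
def bMatches (v : String) (sk : String) : Bool :=
  if PySem.Str.len v ≤ 2 then sk == v
  else PySem.Str.isIn v sk || PySem.Str.isIn sk v

-- body of the index scan for one folded skill (with the 'continue' on already-matched tools)
def bStep (sk : String) (m : PySem.Set String) (e : String × String) : PySem.Set String :=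
  if PySem.Set.contains m e.1 then m
  else if bMatches e.2 sk then PySem.Set.add m e.1 else m

def extract_tools_from_skills_list_py_alt (skills : List String) : List String :=
  let matched : PySem.Set String :=
    skills.foldl (fun m s => VARIANT_INDEX.foldl (bStep (pyFold (PySem.Str.strip s))) m)
      PySem.Set.empty
  (TOOLS_KEYWORDS.map Prod.fst).filter (fun t => PySem.Set.contains matched t)

-- ===== PRECONDITION & SPEC =====
def Spec_extract_tools_from_skills_list_py (skills : List String) (out : List String) : Prop := out = extract_tools_from_skills_list_py_alt skills
instance (skills : List String) (out : List String) : Decidable (Spec_extract_tools_from_skills_list_py skills out) := by unfold Spec_extract_tools_from_skills_list_py; infer_instance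

-- ===== CLAIM (what is proved, stated in full; the proofs are below) =====
def Claim_equal_extract_tools_from_skills_list_py : Prop := ∀ (skills : List String), Dom_extract_tools_from_skills_list_py skills → Spec_extract_tools_from_skills_list_py skills (extract_tools_from_skills_list_py skills)

-- ===== LEMMAS AND PROOFS =====

-- A's inner variant loop is an `any` over variants
theorem aVarLoop_eq_any (sk : String) (vs : List String) :
    aVarLoop sk vs = vs.any (fun v => bMatches (pyFold (PySem.Str.strip v)) sk) := by
  induction vs with
  | nil => rfl
  | cons v rest ih =>
      show (if bMatches (pyFold (PySem.Str.strip v)) sk then true else aVarLoop sk rest) = _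
      rw [List.any_cons, ← ih]
      cases bMatches (pyFold (PySem.Str.strip v)) sk <;> rfl

-- A's middle skill loop is an `any` over skills
theorem aSkillLoop_eq_any (skills vs : List String) :
    aSkillLoop skills vs = skills.any (fun s => aVarLoop (pyFold (PySem.Str.strip s)) vs) := by
  induction skills with
  | nil => rfl
  | cons s rest ih =>
      show (if aVarLoop (pyFold (PySem.Str.strip s)) vs then true else aSkillLoop rest vs) = _
      rw [List.any_cons, ← ih]
      cases aVarLoop (pyFold (PySem.Str.strip s)) vs <;> rfl

-- membership after one pass of B's index scan
theorem contains_foldl_bStep (sk t : String) (l : List (String × String)) (m : PySem.Set String) :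
    PySem.Set.contains (l.foldl (bStep sk) m) t
      = (PySem.Set.contains m t || l.any (fun e => e.1 == t && bMatches e.2 sk)) := by
  induction l generalizing m with
  | nil => simp
  | cons e rest ih =>
      rw [List.foldl_cons, ih, List.any_cons]
      have hstep : PySem.Set.contains (bStep sk m e) t
          = (PySem.Set.contains m t || (e.1 == t && bMatches e.2 sk)) := by
        unfold bStep PySem.Set.add
        simp only [PySem.Set.contains, List.contains_eq_mem]
        by_cases h1 : e.1 ∈ m
        · by_cases h2 : e.1 = t
          · subst h2; simp [h1]
          · simp [h1, h2]
        · by_cases h3 : bMatches e.2 sk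
          · by_cases h2 : e.1 = t
            · subst h2; simp [h1, h3]
            · simp [h1, h3, h2, Ne.symm h2]
          · simp [h1, h3]
      rw [hstep]
      cases PySem.Set.contains m t <;> cases (e.1 == t && bMatches e.2 sk) <;> simp

-- membership in B's final matched set
theorem contains_matched (skills : List String) (t : String) (m : PySem.Set String) :
    PySem.Set.contains
        (skills.foldl (fun m s => VARIANT_INDEX.foldl (bStep (pyFold (PySem.Str.strip s))) m) m) t
      = (PySem.Set.contains m t ||
         skills.any (fun s =>
           VARIANT_INDEX.any (fun e => e.1 == t && bMatches e.2 (pyFold (PySem.Str.strip s))))) := by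
  induction skills generalizing m with
  | nil => simp
  | cons s rest ih =>
      rw [List.foldl_cons, ih, contains_foldl_bStep, List.any_cons, Bool.or_assoc]

-- keys of the keyword table are pairwise distinct
theorem nodup_keys : (TOOLS_KEYWORDS.map Prod.fst).Nodup := by decide

-- an `any` with a key-equality conjunct over distinct keys picks out that key's entry
theorem any_key_eq {B : Type} (l : List (String × B)) (hl : (l.map Prod.fst).Nodup)
    (p : String × B) (hp : p ∈ l) (g : String × B → Bool) :
    l.any (fun e => (e.1 == p.1) && g e) = g p := by
  induction l with
  | nil => cases hp
  | cons e rest ih =>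
      rw [List.map_cons, List.nodup_cons] at hl
      rw [List.any_cons]
      rcases List.mem_cons.mp hp with h | h
      · subst h
        have hrest : rest.any (fun e' => (e'.1 == p.1) && g e') = false := by
          rw [List.any_eq_false]
          intro a ha
          have hne : a.1 ≠ p.1 := fun hk => hl.1 (hk ▸ List.mem_map_of_mem ha)
          simp [hne]
        rw [hrest]
        simp
      · have hne : e.1 ≠ p.1 := fun hk => hl.1 (hk ▸ List.mem_map_of_mem h)
        rw [ih hl.2 h]
        simp [hne]

-- per-pair: B's flat-index scan restricted to one tool name is A's per-tool scan
theorem per_pair (skills : List String) (p : String × List String) (hp : p ∈ TOOLS_KEYWORDS) :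
    (skills.any (fun s =>
        VARIANT_INDEX.any (fun e => e.1 == p.1 && bMatches e.2 (pyFold (PySem.Str.strip s)))))
      = aSkillLoop skills p.2 := by
  rw [aSkillLoop_eq_any]
  refine List.any_congr rfl (fun s => ?_)
  rw [aVarLoop_eq_any]
  unfold VARIANT_INDEX
  rw [List.any_flatMap]
  have hstep : ∀ q : String × List String,
      ((q.2.map (fun v => (q.1, pyFold (PySem.Str.strip v)))).any
        (fun e => e.1 == p.1 && bMatches e.2 (pyFold (PySem.Str.strip s))))
      = ((q.1 == p.1) &&
         q.2.any (fun v => bMatches (pyFold (PySem.Str.strip v)) (pyFold (PySem.Str.strip s)))) := by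
    intro q
    rw [List.any_map]
    cases hq : (q.1 == p.1) <;> simp [Function.comp_def, hq]
  rw [List.any_congr rfl hstep]
  exact any_key_eq TOOLS_KEYWORDS nodup_keys p hp
    (fun q => q.2.any (fun v => bMatches (pyFold (PySem.Str.strip v)) (pyFold (PySem.Str.strip s))))

-- A's append-if fold equals filtering the name list by a pointwise-equal predicate
theorem foldl_append_if_eq_filter (q : String → Bool) (l : List (String × List String))
    (Q : String × List String → Bool)
    (hQ : ∀ p ∈ l, Q p = q p.1) (init : List String) :
    l.foldl (fun found p => if Q p then found ++ [p.1] else found) init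
      = init ++ (l.map Prod.fst).filter q := by
  induction l generalizing init with
  | nil => simp
  | cons p rest ih =>
      rw [List.foldl_cons, List.map_cons, List.filter_cons]
      have hq := hQ p (List.mem_cons_self)
      by_cases h : Q p
      · rw [if_pos h, ih (fun x hx => hQ x (List.mem_cons_of_mem _ hx)) _]
        rw [hq] at h
        simp [h]
      · rw [if_neg h, ih (fun x hx => hQ x (List.mem_cons_of_mem _ hx)) _]
        rw [hq] at h
        simp [h]

-- ===== VERDICT (by name: the statement is the Claim_ definition above) =====
set_option maxHeartbeats 800000 in
theorem extract_tools_from_skills_list_py_spec : Claim_equal_extract_tools_from_skills_list_py := by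
  intro skills _
  show extract_tools_from_skills_list_py skills = extract_tools_from_skills_list_py_alt skills
  have hq : ∀ p ∈ TOOLS_KEYWORDS,
      (fun p => aSkillLoop skills p.2) p
        = (fun t => PySem.Set.contains
            (skills.foldl (fun m s => VARIANT_INDEX.foldl (bStep (pyFold (PySem.Str.strip s))) m)
              PySem.Set.empty) t) p.1 := by
    intro p hp
    show aSkillLoop skills p.2
        = PySem.Set.contains
            (skills.foldl (fun m s => VARIANT_INDEX.foldl (bStep (pyFold (PySem.Str.strip s))) m)
              PySem.Set.empty) p.1
    rw [contains_matched, per_pair skills p hp]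
    simp [PySem.Set.contains, PySem.Set.empty]
  unfold extract_tools_from_skills_list_py extract_tools_from_skills_list_py_alt
  have h := foldl_append_if_eq_filter
      (fun t => PySem.Set.contains
        (skills.foldl (fun m s => VARIANT_INDEX.foldl (bStep (pyFold (PySem.Str.strip s))) m)
          PySem.Set.empty) t)
      TOOLS_KEYWORDS (fun p => aSkillLoop skills p.2) hq []
  rw [List.nil_append] at h
  exact h
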